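-- pv_equiv track=rewrite | github.com/rionhunter/python_scripts | text_editing/quick_parse.py | check_caps_sequence
-- ===== SOURCE A (Python) =====
-- import string
--
-- def check_caps_sequence(text):
--     words = text.split()
--     count = 0
--     for word in words:
--         stripped = word.strip(string.punctuation)
--         if (
--             stripped
--             and any(c.isalpha() for c in stripped)
--             and stripped == stripped.upper()
--         ):
--             count += 1
--             if count >= 10:
--                 return True
--         else:
--             count = 0
--     return False
-- ===== SOURCE B (Python) =====
-- import string
--
--
-- def is_caps_word(word):
--     stripped = word.strip(string.punctuation)
--     return (
--         bool(stripped)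
--         and any(c.isalpha() for c in stripped)
--         and stripped == stripped.upper()
--     )
--
--
-- def _has_caps_window(words):
--     # brute-force sliding window: test every window of 10 consecutive words
--     while len(words) >= 10:
--         if all(is_caps_word(w) for w in words[:10]):
--             return True
--         words = words[1:]
--     return False
--
--
-- def check_caps_sequence(text):
--     return _has_caps_window(text.split())
-- ===== Notes on version B (the rewrite author's own statement) =====
-- stated objective: alternative
-- what changed: Replaced A's single-pass running counter with reset by a brute-force sliding window that tests every window of 10 consecutive words with an all(is_caps_word) check, shrinking the list one word at a time.
import Mathlib
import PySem

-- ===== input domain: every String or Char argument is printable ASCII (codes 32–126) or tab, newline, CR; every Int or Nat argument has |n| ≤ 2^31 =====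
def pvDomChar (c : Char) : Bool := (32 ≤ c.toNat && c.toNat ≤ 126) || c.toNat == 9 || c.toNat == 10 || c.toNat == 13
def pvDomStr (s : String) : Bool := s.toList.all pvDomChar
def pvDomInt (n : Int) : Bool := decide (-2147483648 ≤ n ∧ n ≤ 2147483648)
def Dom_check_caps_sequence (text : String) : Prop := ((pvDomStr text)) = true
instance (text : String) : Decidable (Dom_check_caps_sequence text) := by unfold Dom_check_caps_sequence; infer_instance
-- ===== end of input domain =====

-- B replaces A's single-pass running counter with reset by a brute-force sliding window
-- testing every window of 10 consecutive words; objective: alternative (same result, no speed claim).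

-- string.punctuation
def pvPunct : String := "!\"#$%&'()*+,-./:;<=>?@[\\]^_`{|}~"

-- ===== PORT A =====
def aCapsLoop : List String → Nat → Bool
  | [], _ => false
  | w :: rest, count =>
    let stripped := PySem.Str.stripChars w pvPunct
    if (stripped != "") && stripped.toList.any PySem.Chars.isalpha
        && (stripped == PySem.Str.upper stripped) then
      if 10 ≤ count + 1 then true else aCapsLoop rest (count + 1)
    else
      aCapsLoop rest 0

def check_caps_sequence (text : String) : Bool :=
  aCapsLoop (PySem.Str.split₀ text) 0

-- ===== PORT B =====
def isCapsWord (w : String) : Bool :=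
  let stripped := PySem.Str.stripChars w pvPunct
  (stripped != "") && stripped.toList.any PySem.Chars.isalpha
    && (stripped == PySem.Str.upper stripped)

-- the while loop of _has_caps_window, as the obvious structural recursion
def hasCapsWindow (ws : List String) : Bool :=
  if h : ws.length < 10 then false
  else if (ws.take 10).all isCapsWord then true
  else hasCapsWindow (ws.drop 1)
termination_by ws.length
decreasing_by simp; omega

def check_caps_sequence_alt (text : String) : Bool :=
  hasCapsWindow (PySem.Str.split₀ text)

-- ===== PRECONDITION & SPEC =====
def Spec_check_caps_sequence (text : String) (out : Bool) : Prop := out = check_caps_sequence_alt text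
instance (text : String) (out : Bool) : Decidable (Spec_check_caps_sequence text out) := by unfold Spec_check_caps_sequence; infer_instance

-- ===== CLAIM (what is proved, stated in full; the proofs are below) =====
def Claim_equal_check_caps_sequence : Prop := ∀ (text : String), Dom_check_caps_sequence text → Spec_check_caps_sequence text (check_caps_sequence text)

-- ===== LEMMAS AND PROOFS =====

lemma aCapsLoop_cons (w : String) (rest : List String) (c : Nat) :
    aCapsLoop (w :: rest) c =
      if isCapsWord w then (if 10 ≤ c + 1 then true else aCapsLoop rest (c + 1))
      else aCapsLoop rest 0 := rfl

lemma len_takeWhile_le {α : Type} (p : α → Bool) :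
    ∀ l : List α, (l.takeWhile p).length ≤ l.length := by
  intro l
  induction l with
  | nil => simp
  | cons x xs ih =>
    by_cases hp : p x = true
    · simp only [List.takeWhile_cons, hp, if_pos, List.length_cons]
      omega
    · simp [List.takeWhile_cons, hp]

-- the first n elements all satisfy p iff the takeWhile prefix has length ≥ n (for n ≤ |l|)
lemma take_all_iff_takeWhile {α : Type} (p : α → Bool) :
    ∀ (l : List α) (n : Nat), n ≤ l.length →
      (((l.take n).all p = true) ↔ n ≤ (l.takeWhile p).length) := by
  intro l
  induction l with
  | nil =>
    intro n hn
    have : n = 0 := by simpa using hn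
    subst this; simp
  | cons x xs ih =>
    intro n hn
    cases n with
    | zero => simp
    | succ m =>
      by_cases hp : p x = true
      · simp only [List.take_succ_cons, List.all_cons, hp, Bool.true_and,
          List.takeWhile_cons, if_pos, List.length_cons]
        rw [ih m (by simpa using hn)]
        omega
      · simp [hp, List.takeWhile_cons]

lemma hasCapsWindow_short (ws : List String) (h : ws.length < 10) :
    hasCapsWindow ws = false := by
  rw [hasCapsWindow]; simp [h]

lemma hasCapsWindow_cons (w : String) (rest : List String) :
    hasCapsWindow (w :: rest)
      = (decide (10 ≤ ((w :: rest).takeWhile isCapsWord).length) || hasCapsWindow rest) := by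
  by_cases hlen : (w :: rest).length < 10
  · have h1 : rest.length < 10 := by simp at hlen ⊢; omega
    have h2 : ¬ 10 ≤ ((w :: rest).takeWhile isCapsWord).length := by
      have h3 := len_takeWhile_le isCapsWord (w :: rest)
      have hb : (w :: rest).length = rest.length + 1 := by simp
      omega
    rw [hasCapsWindow_short _ hlen, hasCapsWindow_short _ h1]
    simp [h2]
  · have hiff := take_all_iff_takeWhile isCapsWord (w :: rest) 10 (by omega)
    by_cases hall : ((w :: rest).take 10).all isCapsWord = true
    · have hT : 10 ≤ ((w :: rest).takeWhile isCapsWord).length := hiff.mp hall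
      rw [hasCapsWindow, dif_neg hlen, if_pos hall]
      simp [hT]
    · have hT : ¬ 10 ≤ ((w :: rest).takeWhile isCapsWord).length := fun h => hall (hiff.mpr h)
      rw [hasCapsWindow, dif_neg hlen, if_neg hall]
      simp [hT]

-- a caps prefix of length ≥ 10 is already found by the window scan
lemma window_subsume (ws : List String) :
    (decide (10 ≤ (ws.takeWhile isCapsWord).length) || hasCapsWindow ws) = hasCapsWindow ws := by
  by_cases hT : 10 ≤ (ws.takeWhile isCapsWord).length
  · have hlen : ¬ ws.length < 10 := by
      have := len_takeWhile_le isCapsWord ws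
      omega
    have hall : (ws.take 10).all isCapsWord = true :=
      (take_all_iff_takeWhile isCapsWord ws 10 (by omega)).mpr hT
    have htrue : hasCapsWindow ws = true := by
      rw [hasCapsWindow, dif_neg hlen, if_pos hall]
    simp [htrue]
  · simp [hT]

-- A's counter loop, characterised against the window scan
lemma aCapsLoop_eq (ws : List String) : ∀ c : Nat, c < 10 →
    aCapsLoop ws c
      = (decide (10 ≤ c + (ws.takeWhile isCapsWord).length) || hasCapsWindow ws) := by
  induction ws with
  | nil =>
    intro c hc
    rw [hasCapsWindow_short [] (by simp)]
    simp [aCapsLoop]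
    omega
  | cons w rest ih =>
    intro c hc
    rw [aCapsLoop_cons, hasCapsWindow_cons]
    by_cases hw : isCapsWord w
    · simp only [hw, if_pos, List.takeWhile_cons, List.length_cons]
      by_cases h10 : 10 ≤ c + 1
      · have h2 : 10 ≤ c + ((rest.takeWhile isCapsWord).length + 1) := by omega
        simp [h10, h2]
      · rw [if_neg h10, ih (c + 1) (by omega)]
        generalize hasCapsWindow rest = y
        generalize (rest.takeWhile isCapsWord).length = T
        rw [Bool.eq_iff_iff]
        cases y <;> simp <;> omega
    · simp only [Bool.not_eq_true] at hw
      rw [hw]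
      simp only [Bool.false_eq_true, if_false, List.takeWhile_cons, hw, List.length_nil]
      rw [ih 0 (by omega)]
      simp only [Nat.zero_add]
      rw [window_subsume rest]
      rcases Bool.eq_false_or_eq_true (hasCapsWindow rest) with h | h <;>
        rw [h] <;> simp <;> omega

-- ===== VERDICT (by name: the statement is the Claim_ definition above) =====
theorem check_caps_sequence_spec : Claim_equal_check_caps_sequence := by
  intro text _
  unfold Spec_check_caps_sequence check_caps_sequence check_caps_sequence_alt
  rw [aCapsLoop_eq _ 0 (by omega)]
  simpa using window_subsume (PySem.Str.split₀ text)
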